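-- pv_equiv track=rewrite | github.com/kamomental/eqnet-core | scripts/summarize_weekly_calibration.py | _is_followed
-- ===== SOURCE A (Python) =====
-- from typing import Any, Dict, List, Optional, Tuple
--
-- def _is_followed(action_code: str, next_changed_keys: List[str]) -> bool:
--     if action_code == "saturation_high":
--         return any(
--             key.startswith("assoc_clamp.")
--             or key.startswith("assoc_weights.")
--             or key == "assoc_temporal_tau_sec"
--             for key in next_changed_keys
--         )
--     if action_code == "retrieval_sparse":
--         return any(
--             key.startswith("assoc_weights.")
--             or key == "assoc_temporal_tau_sec"
--             for key in next_changed_keys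
--         )
--     if action_code == "uncertainty_high":
--         return any(
--             key in {"confidence_low_max", "confidence_mid_max"}
--             or key.startswith("assoc_")
--             for key in next_changed_keys
--         )
--     return False
-- ===== SOURCE B (Python) =====
-- from typing import List, Set
--
-- def _codes_for(key: str) -> Set[str]:
--     """Which action codes this single changed key counts as following."""
--     codes = set()
--     if key == "assoc_temporal_tau_sec":
--         codes.update(("saturation_high", "retrieval_sparse"))
--     if key.startswith("assoc_clamp."):
--         codes.add("saturation_high")
--     if key.startswith("assoc_weights."):
--         codes.update(("saturation_high", "retrieval_sparse"))
--     if key in ("confidence_low_max", "confidence_mid_max") or key.startswith("assoc_"):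
--         codes.add("uncertainty_high")
--     return codes
--
-- def _is_followed(action_code: str, next_changed_keys: List[str]) -> bool:
--     followed = set()
--     for key in next_changed_keys:
--         followed |= _codes_for(key)
--     return action_code in followed
-- ===== Notes on version B (the rewrite author's own statement) =====
-- stated objective: alternative
-- what changed: Inverts A's decomposition: instead of branching on the action code and scanning the keys with a code-specific predicate, B classifies each key independently into the set of action codes it follows, accumulates the union of those sets over all keys, and finally membership-tests the given action code in it.
import Mathlib
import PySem

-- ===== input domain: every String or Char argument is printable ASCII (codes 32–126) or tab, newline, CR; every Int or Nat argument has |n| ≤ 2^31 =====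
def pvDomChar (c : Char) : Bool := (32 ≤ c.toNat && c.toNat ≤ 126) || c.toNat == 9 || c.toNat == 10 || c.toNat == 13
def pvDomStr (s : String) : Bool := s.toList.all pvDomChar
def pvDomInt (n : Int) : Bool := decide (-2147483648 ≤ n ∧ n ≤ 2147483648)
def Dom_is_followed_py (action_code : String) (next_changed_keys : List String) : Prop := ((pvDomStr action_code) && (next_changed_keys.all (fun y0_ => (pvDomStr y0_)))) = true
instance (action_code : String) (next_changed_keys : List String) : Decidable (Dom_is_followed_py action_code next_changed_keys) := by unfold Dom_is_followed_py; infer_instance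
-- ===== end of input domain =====

-- B inverts A's decomposition: it classifies each key into the set of action codes it follows, unions those sets, and membership-tests the action code; objective: alternative.


-- ===== PORT A =====
def is_followed_py (action_code : String) (next_changed_keys : List String) : Bool :=
  if action_code = "saturation_high" then
    next_changed_keys.any (fun key =>
      PySem.Str.startswith key "assoc_clamp."
      || PySem.Str.startswith key "assoc_weights."
      || key == "assoc_temporal_tau_sec")
  else if action_code = "retrieval_sparse" then
    next_changed_keys.any (fun key =>
      PySem.Str.startswith key "assoc_weights."
      || key == "assoc_temporal_tau_sec")
  else if action_code = "uncertainty_high" then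
    next_changed_keys.any (fun key =>
      (PySem.Set.ofList ["confidence_low_max", "confidence_mid_max"]).contains key
      || PySem.Str.startswith key "assoc_")
  else
    false

-- ===== PORT B =====
-- the set of action codes a single changed key counts as following
def pvCodesFor (key : String) : PySem.Set String :=
  let codes : PySem.Set String := PySem.Set.empty
  let codes := if key == "assoc_temporal_tau_sec" then
      PySem.Set.update codes ["saturation_high", "retrieval_sparse"] else codes
  let codes := if PySem.Str.startswith key "assoc_clamp." then
      PySem.Set.add codes "saturation_high" else codes
  let codes := if PySem.Str.startswith key "assoc_weights." then
      PySem.Set.update codes ["saturation_high", "retrieval_sparse"] else codes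
  let codes := if ["confidence_low_max", "confidence_mid_max"].contains key
      || PySem.Str.startswith key "assoc_" then
      PySem.Set.add codes "uncertainty_high" else codes
  codes

def is_followed_py_alt (action_code : String) (next_changed_keys : List String) : Bool :=
  let followed := next_changed_keys.foldl
    (fun acc key => PySem.Set.union acc (pvCodesFor key)) PySem.Set.empty
  followed.contains action_code

-- ===== PRECONDITION & SPEC =====
def Spec_is_followed_py (action_code : String) (next_changed_keys : List String) (out : Bool) : Prop := out = is_followed_py_alt action_code next_changed_keys
instance (action_code : String) (next_changed_keys : List String) (out : Bool) : Decidable (Spec_is_followed_py action_code next_changed_keys out) := by unfold Spec_is_followed_py; infer_instance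

-- ===== CLAIM (what is proved, stated in full; the proofs are below) =====
def Claim_equal_is_followed_py : Prop := ∀ (action_code : String) (next_changed_keys : List String), Dom_is_followed_py action_code next_changed_keys → Spec_is_followed_py action_code next_changed_keys (is_followed_py action_code next_changed_keys)

-- ===== LEMMAS AND PROOFS =====

theorem mem_fold_union {a : String} (ks : List String) (s : PySem.Set String) :
    a ∈ ks.foldl (fun acc key => PySem.Set.union acc (pvCodesFor key)) s ↔
      a ∈ s ∨ ∃ k ∈ ks, a ∈ pvCodesFor k := by
  induction ks generalizing s with
  | nil => simp
  | cons k ks ih =>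
    simp only [List.foldl_cons, ih, PySem.Set.mem_union, List.mem_cons]
    constructor
    · rintro (⟨h | h⟩ | ⟨k', hk', h⟩)
      · exact Or.inl h
      · exact Or.inr ⟨k, Or.inl rfl, h⟩
      · exact Or.inr ⟨k', Or.inr hk', h⟩
    · rintro (h | ⟨k', hk' | hk', h⟩)
      · exact Or.inl (Or.inl h)
      · exact Or.inl (Or.inr (hk' ▸ h))
      · exact Or.inr ⟨k', hk', h⟩

theorem mem_pvCodesFor (a k : String) :
    a ∈ pvCodesFor k ↔
      (a = "saturation_high" ∧ (PySem.Str.startswith k "assoc_clamp."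
          || PySem.Str.startswith k "assoc_weights." || k == "assoc_temporal_tau_sec") = true)
      ∨ (a = "retrieval_sparse" ∧ (PySem.Str.startswith k "assoc_weights."
          || k == "assoc_temporal_tau_sec") = true)
      ∨ (a = "uncertainty_high" ∧ (k ∈ (["confidence_low_max", "confidence_mid_max"] : List String)
          ∨ PySem.Str.startswith k "assoc_")) := by
  unfold pvCodesFor
  split_ifs with h1 h2 h3 h4 <;>
    simp_all [PySem.Set.empty]

-- ===== VERDICT (by name: the statement is the Claim_ definition above) =====
theorem is_followed_py_spec : Claim_equal_is_followed_py := by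
  intro a ks _
  unfold Spec_is_followed_py is_followed_py is_followed_py_alt
  simp only []
  rw [Bool.eq_iff_iff, PySem.Set.contains_iff, mem_fold_union]
  by_cases h1 : a = "saturation_high" <;>
  by_cases h2 : a = "retrieval_sparse" <;>
  by_cases h3 : a = "uncertainty_high" <;>
  simp_all [mem_pvCodesFor, List.any_eq_true, PySem.Set.empty, PySem.Set.ofList]
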